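-- pv_equiv track=rewrite | github.com/wpedrak/advent_of_code | 2022/15/solution2.py | can_put_beacon_in_row
-- ===== SOURCE A (Python) =====
-- pnt = tuple[int, int]
--
-- def can_put_beacon_in_row(signals: list[tuple[pnt, pnt]], y: int) -> bool:
--     intervals = []
--     for signal in signals:
--         x1, x2 = square_line_intersect(signal[0], manhatan(signal[0], signal[1]), y)
--         if (x1, x2) != (None, None):
--             intervals.append((max(x1, 0), min(x2, 4000000)))
--
--     no_becon_places = 0
--
--     # counted_ptr points to the place after the last concidered x
--     counted_ptr = 0
--     for x1, x2 in sorted(intervals):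
--         counted_ptr = max(counted_ptr, x1)
--         if counted_ptr > x2:
--             continue
--         no_becon_places += x2 - counted_ptr + 1
--         counted_ptr = x2 + 1
--
--     return no_becon_places < 4000001
--
-- def manhatan(a: tuple[int, int], b: tuple[int, int]) -> int:
--     return abs(a[0]-b[0]) + abs(a[1]-b[1])
--
-- def square_line_intersect(middle: pnt, radius: int, y: int) -> tuple[int, int]:
--     dist_to_y = abs(middle[1] - y)
--     if radius < dist_to_y:
--         return None, None
--
--     remaining_range = radius - dist_to_y
--     return (middle[0] - remaining_range, middle[0] + remaining_range)
-- ===== SOURCE B (Python) =====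
-- def can_put_beacon_in_row(signals, y):
--     intervals = []
--     for s, b in signals:
--         r = abs(s[0] - b[0]) + abs(s[1] - b[1]) - abs(s[1] - y)
--         if r >= 0:
--             intervals.append((max(s[0] - r, 0), min(s[0] + r, 4000000)))
--     # A free spot exists iff some candidate point (0, or just past an interval's
--     # right end) inside [0, 4000000] is covered by no interval.
--     candidates = [0] + [x2 + 1 for _, x2 in intervals]
--     return any(
--         0 <= c <= 4000000 and all(not (x1 <= c <= x2) for x1, x2 in intervals)
--         for c in candidates)
-- ===== Notes on version B (the rewrite author's own statement) =====
-- stated objective: alternative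
-- what changed: B drops A's sort-and-sweep coverage counting entirely: it tests the finite set of candidate points (0 and each interval's right end + 1) against all intervals, returning True iff some candidate in [0,4000000] is covered by no interval; correct because the least uncovered point must be 0 or lie just past an interval's right end.
import Mathlib
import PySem

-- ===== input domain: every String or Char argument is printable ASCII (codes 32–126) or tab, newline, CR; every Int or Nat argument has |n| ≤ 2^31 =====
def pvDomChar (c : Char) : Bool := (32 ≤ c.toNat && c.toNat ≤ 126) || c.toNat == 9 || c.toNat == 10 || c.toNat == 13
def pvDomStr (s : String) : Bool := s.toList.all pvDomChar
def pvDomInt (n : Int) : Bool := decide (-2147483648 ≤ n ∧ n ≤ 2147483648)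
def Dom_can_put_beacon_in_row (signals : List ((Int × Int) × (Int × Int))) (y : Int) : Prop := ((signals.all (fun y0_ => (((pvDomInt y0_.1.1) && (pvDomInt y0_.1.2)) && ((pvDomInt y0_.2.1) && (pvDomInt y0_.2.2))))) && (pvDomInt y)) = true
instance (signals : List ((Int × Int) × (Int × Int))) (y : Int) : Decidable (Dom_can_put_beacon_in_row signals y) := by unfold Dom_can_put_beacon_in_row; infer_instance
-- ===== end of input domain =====

-- B replaces A's sort-and-sweep coverage count by a candidate-point test (no sorting):
-- a free spot exists iff 0 or some interval's right end + 1, inside [0,4000000], is covered by no interval.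

-- ===== PORT A =====
def manhatan (a : Int × Int) (b : Int × Int) : Int :=
  |a.1 - b.1| + |a.2 - b.2|

-- returns `none` for Python's `(None, None)`
def square_line_intersect (middle : Int × Int) (radius : Int) (y : Int) : Option (Int × Int) :=
  let dist_to_y := |middle.2 - y|
  if radius < dist_to_y then none
  else
    let remaining_range := radius - dist_to_y
    some (middle.1 - remaining_range, middle.1 + remaining_range)

-- the body of A's second `for` loop (one step of the counting sweep): state = (no_becon_places, counted_ptr)
def pvAStep (st : Int × Int) (p : Int × Int) : Int × Int :=
  let counted_ptr := max st.2 p.1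
  if counted_ptr > p.2 then (st.1, counted_ptr)
  else (st.1 + (p.2 - counted_ptr + 1), p.2 + 1)

def can_put_beacon_in_row (signals : List ((Int × Int) × (Int × Int))) (y : Int) : Bool :=
  let intervals := signals.foldl (fun acc signal =>
    match square_line_intersect signal.1 (manhatan signal.1 signal.2) y with
    | none => acc
    | some (x1, x2) => acc ++ [(max x1 0, min x2 4000000)]) []
  let res := (PySem.List.sorted2 intervals Prod.fst Prod.snd).foldl pvAStep (0, 0)
  decide (res.1 < 4000001)

-- ===== PORT B =====
def pvIntervalsB (signals : List ((Int × Int) × (Int × Int))) (y : Int) : List (Int × Int) :=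
  signals.filterMap (fun s =>
    let r := |s.1.1 - s.2.1| + |s.1.2 - s.2.2| - |s.1.2 - y|
    if r ≥ 0 then some (max (s.1.1 - r) 0, min (s.1.1 + r) 4000000) else none)

def can_put_beacon_in_row_alt (signals : List ((Int × Int) × (Int × Int))) (y : Int) : Bool :=
  let intervals := pvIntervalsB signals y
  let candidates := 0 :: intervals.map (fun p => p.2 + 1)
  candidates.any (fun c =>
    (decide (0 ≤ c) && decide (c ≤ 4000000)) &&
    intervals.all (fun p => !(decide (p.1 ≤ c) && decide (c ≤ p.2))))

-- ===== PRECONDITION & SPEC =====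
def Spec_can_put_beacon_in_row (signals : List ((Int × Int) × (Int × Int))) (y : Int) (out : Bool) : Prop := out = can_put_beacon_in_row_alt signals y
instance (signals : List ((Int × Int) × (Int × Int))) (y : Int) (out : Bool) : Decidable (Spec_can_put_beacon_in_row signals y out) := by unfold Spec_can_put_beacon_in_row; infer_instance

-- ===== CLAIM (what is proved, stated in full; the proofs are below) =====
def Claim_equal_can_put_beacon_in_row : Prop := ∀ (signals : List ((Int × Int) × (Int × Int))) (y : Int), Dom_can_put_beacon_in_row signals y → Spec_can_put_beacon_in_row signals y (can_put_beacon_in_row signals y)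

-- ===== LEMMAS AND PROOFS =====

-- proof-only helper: the coverage-frontier sweep (intermediate between A's counter and B's candidates)
def pvSweep (l : List (Int × Int)) (reach : Int) : Bool :=
  match l with
  | [] => decide (reach ≤ 4000000)
  | (x1, x2) :: rest =>
    if reach > 4000000 then false
    else if x1 > reach then true
    else pvSweep rest (max reach (x2 + 1))

theorem pvAStep_fst (st p : Int × Int) :
    (pvAStep st p).1 = if max st.2 p.1 > p.2 then st.1 else st.1 + (p.2 - max st.2 p.1 + 1) := by
  simp only [pvAStep]
  split
  · rfl
  · rfl

theorem pvAStep_snd (st p : Int × Int) :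
    (pvAStep st p).2 = if max st.2 p.1 > p.2 then max st.2 p.1 else p.2 + 1 := by
  simp only [pvAStep]
  split
  · rfl
  · rfl

-- A's interval-building fold equals B's filterMap, up to a leading accumulator.
theorem pv_intervals_eq (signals : List ((Int × Int) × (Int × Int))) (y : Int) :
    ∀ acc : List (Int × Int),
      signals.foldl (fun acc signal =>
        match square_line_intersect signal.1 (manhatan signal.1 signal.2) y with
        | none => acc
        | some (x1, x2) => acc ++ [(max x1 0, min x2 4000000)]) acc
      = acc ++ pvIntervalsB signals y := by
  induction signals with
  | nil => intro acc; simp [pvIntervalsB]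
  | cons s rest ih =>
    intro acc
    simp only [List.foldl_cons]
    by_cases h : manhatan s.1 s.2 < |s.1.2 - y|
    · have hr : square_line_intersect s.1 (manhatan s.1 s.2) y = none := by
        simp only [square_line_intersect]; rw [if_pos h]
      have h2 : ¬ (|s.1.1 - s.2.1| + |s.1.2 - s.2.2| - |s.1.2 - y| ≥ 0) := by
        simp only [manhatan] at h; omega
      rw [hr, ih]
      simp only [pvIntervalsB, List.filterMap_cons, if_neg h2]
    · have hr : square_line_intersect s.1 (manhatan s.1 s.2) y =
          some (s.1.1 - (manhatan s.1 s.2 - |s.1.2 - y|),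
                s.1.1 + (manhatan s.1 s.2 - |s.1.2 - y|)) := by
        simp only [square_line_intersect]; rw [if_neg h]
      have h2 : (|s.1.1 - s.2.1| + |s.1.2 - s.2.2| - |s.1.2 - y| ≥ 0) := by
        simp only [manhatan] at h; omega
      rw [hr, ih]
      simp only [pvIntervalsB, List.filterMap_cons, if_pos h2, manhatan]
      simp [List.append_assoc]

-- The count in A's sweep never decreases.
theorem pv_count_mono (l : List (Int × Int)) :
    ∀ st : Int × Int, st.1 ≤ (l.foldl pvAStep st).1 := by
  induction l with
  | nil => intro st; simp
  | cons p rest ih =>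
    intro st
    have h := ih (pvAStep st p)
    have h2 := pvAStep_fst st p
    simp only [List.foldl_cons]
    split at h2 <;> omega

-- Once count < ptr and count ≤ 4000000, the final count stays ≤ 4000000
-- (all interval right ends are ≤ 4000000).
theorem pv_count_bound (l : List (Int × Int)) (hb : ∀ p ∈ l, p.2 ≤ 4000000) :
    ∀ st : Int × Int, st.1 < st.2 → st.1 ≤ 4000000 →
      (l.foldl pvAStep st).1 ≤ 4000000 := by
  induction l with
  | nil => intro st h1 h2; simpa using h2
  | cons p rest ih =>
    intro st h1 h2
    have hp : p.2 ≤ 4000000 := hb p (by simp)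
    have hb' : ∀ q ∈ rest, q.2 ≤ 4000000 := fun q hq => hb q (by simp [hq])
    have hf := pvAStep_fst st p
    have hs := pvAStep_snd st p
    simp only [List.foldl_cons]
    refine ih hb' (pvAStep st p) ?_ ?_
    · split at hf <;> split at hs <;> omega
    · split at hf <;> omega

-- On a list whose right ends are ≤ 4000000, the frontier sweep from `c`
-- equals A's counting sweep from state (c, c), for 0 ≤ c ≤ 4000001.
theorem pv_sweep_eq_count (l : List (Int × Int)) (hb : ∀ p ∈ l, p.2 ≤ 4000000) :
    ∀ c : Int, 0 ≤ c → c ≤ 4000001 →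
      pvSweep l c = decide ((l.foldl pvAStep (c, c)).1 < 4000001) := by
  induction l with
  | nil => intro c h0 h1; simp [pvSweep]; omega
  | cons p rest ih =>
    intro c h0 h1
    obtain ⟨a, b⟩ := p
    have hbb : b ≤ 4000000 := hb (a, b) (by simp)
    have hb' : ∀ q ∈ rest, q.2 ≤ 4000000 := fun q hq => hb q (by simp [hq])
    have hf : (pvAStep (c, c) (a, b)).1
        = if max c a > b then c else c + (b - max c a + 1) := by rw [pvAStep_fst]
    have hs : (pvAStep (c, c) (a, b)).2
        = if max c a > b then max c a else b + 1 := by rw [pvAStep_snd]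
    simp only [pvSweep, List.foldl_cons]
    by_cases hbig : c > 4000000
    · -- A's count is already 4000001 and never decreases: false on both sides
      rw [if_pos hbig]
      have hmono := pv_count_mono rest (pvAStep (c, c) (a, b))
      rw [eq_comm, decide_eq_false_iff_not, not_lt]
      split at hf <;> omega
    · rw [if_neg hbig]
      by_cases hgap : a > c
      · -- gap found: A's count can never reach 4000001
        rw [if_pos hgap]
        have hbound := pv_count_bound rest hb' (pvAStep (c, c) (a, b))
        rw [eq_comm, decide_eq_true_eq]
        split at hf <;> split at hs <;>
          [skip; omega; omega; skip] <;>
          exact by have := hbound (by omega) (by omega); omega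
      · rw [if_neg hgap]
        have hstep : pvAStep (c, c) (a, b) = (max c (b + 1), max c (b + 1)) := by
          refine Prod.ext ?_ ?_
          · rw [hf]; split <;> omega
          · rw [hs]; split <;> omega
        simp only [hstep]
        exact ih hb' (max c (b + 1)) (by omega) (by omega)

theorem pv_b_bound (signals : List ((Int × Int) × (Int × Int))) (y : Int) :
    ∀ p ∈ PySem.List.sorted2 (pvIntervalsB signals y) Prod.fst Prod.snd, p.2 ≤ 4000000 := by
  intro p hp
  have hmem : p ∈ pvIntervalsB signals y :=
    ((PySem.List.sorted2_perm (pvIntervalsB signals y) Prod.fst Prod.snd false).mem_iff).mp hp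
  simp only [pvIntervalsB, List.mem_filterMap] at hmem
  obtain ⟨s, _, hs⟩ := hmem
  split at hs
  · cases hs
    simp only [min_le_iff]
    omega
  · cases hs

-- insertBy with a fst-compatible comparison preserves Pairwise on fst.
theorem pv_insertBy_pairwise (before : (Int × Int) → (Int × Int) → Bool)
    (hT : ∀ a b, before a b = true → a.1 ≤ b.1)
    (hF : ∀ a b, before a b = false → b.1 ≤ a.1)
    (x : Int × Int) :
    ∀ l : List (Int × Int), l.Pairwise (fun a b => a.1 ≤ b.1) →
      (PySem.List.insertBy before x l).Pairwise (fun a b => a.1 ≤ b.1) := by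
  intro l
  induction l with
  | nil => intro _; simp [PySem.List.insertBy]
  | cons h t ih =>
    intro hp
    rw [List.pairwise_cons] at hp
    simp only [PySem.List.insertBy]
    by_cases hc : before x h = true
    · rw [if_pos hc]
      refine List.pairwise_cons.mpr ⟨?_, List.pairwise_cons.mpr hp⟩
      intro b hb
      rcases List.mem_cons.mp hb with rfl | hb
      · exact hT x b hc
      · exact le_trans (hT x h hc) (hp.1 b hb)
    · rw [if_neg hc]
      refine List.pairwise_cons.mpr ⟨?_, ih hp.2⟩
      intro b hb
      rcases (PySem.List.mem_insertBy before x b t).mp hb with hbx | hb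
      · rw [hbx]; exact hF x h (Bool.eq_false_iff.mpr hc)
      · exact hp.1 b hb

-- sorted2 by (fst, snd) is pairwise nondecreasing in fst.
theorem pv_sorted2_pairwise (xs : List (Int × Int)) :
    (PySem.List.sorted2 xs Prod.fst Prod.snd false).Pairwise (fun a b => a.1 ≤ b.1) := by
  simp only [PySem.List.sorted2, if_neg (by decide : ¬ (false = true))]
  generalize hbefore : (fun a b : Int × Int =>
      (decide (a.1 < b.1) || (!decide (b.1 < a.1) && decide (a.2 < b.2)))) = before
  have hT : ∀ a b : Int × Int, before a b = true → a.1 ≤ b.1 := by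
    intro a b h; rw [← hbefore] at h; simp at h
    rcases h with h | h
    · omega
    · omega
  have hF : ∀ a b : Int × Int, before a b = false → b.1 ≤ a.1 := by
    intro a b h; rw [← hbefore] at h; simp at h
    omega
  have key : ∀ (ys : List (Int × Int)) (acc : List (Int × Int)),
      acc.Pairwise (fun a b => a.1 ≤ b.1) →
      (ys.foldl (fun acc x => PySem.List.insertBy before x acc) acc).Pairwise
        (fun a b => a.1 ≤ b.1) := by
    intro ys
    induction ys with
    | nil => intro acc h; simpa using h
    | cons z zs ih =>
      intro acc h
      simp only [List.foldl_cons]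
      exact ih _ (pv_insertBy_pairwise before hT hF z acc h)
  exact key xs [] (by simp)

-- If some point ≥ c in [·, 4000000] is covered by no interval, the sweep finds the gap.
theorem pv_sweep_true_of_uncov (l : List (Int × Int)) :
    ∀ c m : Int, c ≤ m → m ≤ 4000000 → (∀ p ∈ l, ¬ (p.1 ≤ m ∧ m ≤ p.2)) →
      pvSweep l c = true := by
  induction l with
  | nil => intro c m h1 h2 _; simp [pvSweep]; omega
  | cons p rest ih =>
    intro c m h1 h2 hu
    obtain ⟨a, b⟩ := p
    have hhd : ¬ (a ≤ m ∧ m ≤ b) := hu (a, b) (by simp)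
    have hu' : ∀ q ∈ rest, ¬ (q.1 ≤ m ∧ m ≤ q.2) := fun q hq => hu q (by simp [hq])
    simp only [pvSweep]
    rw [if_neg (by omega)]
    by_cases hgap : a > c
    · rw [if_pos hgap]
    · rw [if_neg hgap]
      exact ih (max c (b + 1)) m (by omega) h2 hu'

-- Conversely, on a fst-sorted list a successful sweep exhibits an uncovered point ≥ c.
theorem pv_sweep_uncov_of_true (l : List (Int × Int)) :
    l.Pairwise (fun a b => a.1 ≤ b.1) →
    ∀ c : Int, pvSweep l c = true →
      ∃ m, c ≤ m ∧ m ≤ 4000000 ∧ ∀ p ∈ l, ¬ (p.1 ≤ m ∧ m ≤ p.2) := by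
  induction l with
  | nil =>
    intro _ c h
    simp [pvSweep] at h
    exact ⟨c, le_refl c, h, by simp⟩
  | cons p rest ih =>
    intro hp c h
    obtain ⟨a, b⟩ := p
    rw [List.pairwise_cons] at hp
    simp only [pvSweep] at h
    by_cases hbig : c > 4000000
    · rw [if_pos hbig] at h; cases h
    · rw [if_neg hbig] at h
      by_cases hgap : a > c
      · refine ⟨c, le_refl c, by omega, ?_⟩
        intro q hq
        rcases List.mem_cons.mp hq with rfl | hq
        · omega
        · have := hp.1 q hq
          omega
      · rw [if_neg hgap] at h
        obtain ⟨m, hm1, hm2, hm3⟩ := ih hp.2 (max c (b + 1)) h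
        refine ⟨m, by omega, hm2, ?_⟩
        intro q hq
        rcases List.mem_cons.mp hq with rfl | hq
        · omega
        · exact hm3 q hq

-- Candidate completeness: any uncovered point in [0,4000000] yields an uncovered
-- candidate (0 or some interval's right end + 1) in [0,4000000].
theorem pv_candidate (ivs : List (Int × Int)) :
    ∀ (n : Nat) (m : Int), m.toNat ≤ n → 0 ≤ m → m ≤ 4000000 →
      (∀ p ∈ ivs, ¬ (p.1 ≤ m ∧ m ≤ p.2)) →
      ∃ c ∈ (0 : Int) :: ivs.map (fun p => p.2 + 1),
        0 ≤ c ∧ c ≤ 4000000 ∧ ∀ p ∈ ivs, ¬ (p.1 ≤ c ∧ c ≤ p.2) := by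
  intro n
  induction n with
  | zero =>
    intro m hn h0 _ hu
    have hm : m = 0 := by omega
    exact ⟨0, by simp, le_refl 0, by omega, hm ▸ hu⟩
  | succ n ih =>
    intro m hn h0 h4 hu
    by_cases hm0 : m = 0
    · exact ⟨0, by simp, le_refl 0, by omega, hm0 ▸ hu⟩
    · by_cases hcov : ∃ p ∈ ivs, p.1 ≤ m - 1 ∧ m - 1 ≤ p.2
      · obtain ⟨p, hpmem, hp1, hp2⟩ := hcov
        have hpm : ¬ (p.1 ≤ m ∧ m ≤ p.2) := hu p hpmem
        have hpe : p.2 + 1 = m := by omega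
        exact ⟨m, List.mem_cons.mpr (Or.inr (List.mem_map.mpr ⟨p, hpmem, hpe⟩)),
          by omega, h4, hu⟩
      · push Not at hcov
        refine ih (m - 1) (by omega) (by omega) (by omega) ?_
        intro p hp
        have := hcov p hp
        omega

-- B's boolean test, as an existential.
theorem pv_alt_iff (signals : List ((Int × Int) × (Int × Int))) (y : Int) :
    can_put_beacon_in_row_alt signals y = true ↔
      ∃ c ∈ (0 : Int) :: (pvIntervalsB signals y).map (fun p => p.2 + 1),
        0 ≤ c ∧ c ≤ 4000000 ∧ ∀ p ∈ pvIntervalsB signals y, ¬ (p.1 ≤ c ∧ c ≤ p.2) := by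
  simp only [can_put_beacon_in_row_alt, List.any_eq_true, Bool.and_eq_true, List.all_eq_true,
    Bool.not_eq_eq_eq_not, Bool.not_true, Bool.and_eq_false_iff, decide_eq_true_eq,
    decide_eq_false_iff_not]
  constructor
  · rintro ⟨c, hc, ⟨⟨h0, h4⟩, hall⟩⟩
    refine ⟨c, hc, h0, h4, fun p hp => ?_⟩
    rcases hall p hp with h | h <;> omega
  · rintro ⟨c, hc, h0, h4, hall⟩
    refine ⟨c, hc, ⟨⟨h0, h4⟩, fun p hp => ?_⟩⟩
    have := hall p hp
    by_cases h : p.1 ≤ c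
    · exact Or.inr (by omega)
    · exact Or.inl (by omega)

-- ===== VERDICT (by name: the statement is the Claim_ definition above) =====
theorem can_put_beacon_in_row_spec : Claim_equal_can_put_beacon_in_row := by
  intro signals y _
  unfold Spec_can_put_beacon_in_row can_put_beacon_in_row
  rw [pv_intervals_eq signals y []]
  simp only [List.nil_append]
  have hsw := pv_sweep_eq_count _ (pv_b_bound signals y) 0 (by norm_num) (by norm_num)
  have hperm := PySem.List.sorted2_perm (pvIntervalsB signals y) Prod.fst Prod.snd false
  have hmain : pvSweep (PySem.List.sorted2 (pvIntervalsB signals y) Prod.fst Prod.snd) 0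
      = can_put_beacon_in_row_alt signals y := by
    rw [Bool.eq_iff_iff, pv_alt_iff]
    constructor
    · intro h
      obtain ⟨m, hm0, hm4, hmu⟩ := pv_sweep_uncov_of_true _
        (pv_sorted2_pairwise (pvIntervalsB signals y)) 0 h
      exact pv_candidate _ m.toNat m (le_refl _) hm0 hm4
        (fun p hp => hmu p (hperm.mem_iff.mpr hp))
    · rintro ⟨c, _, h0, h4, hu⟩
      exact pv_sweep_true_of_uncov _ 0 c h0 h4 (fun p hp => hu p (hperm.mem_iff.mp hp))
  exact hsw.symm.trans hmain
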